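-- pv_equiv track=rewrite | github.com/czbiohub-sf/MIDAS | midas2/subcommands/run_species.py | filter_species_by_alns
-- ===== SOURCE A (Python) =====
-- from collections import defaultdict
--
-- def filter_species_by_alns(alns, min_mreads=2, min_mcounts=2):
--     """ Only species with more then 2 markers covered by 2 reads are reported """
--     # Each marker needs to be covered by more than one reads
--     filtered_alns = defaultdict(lambda: defaultdict(dict))
--     filtered_covered_markers = defaultdict(list)
--
--     for spid, aln_dict in alns.items():
--         for mkid, mkdict in aln_dict.items():
--             if mkdict['readcounts'] >= min_mreads:
--                 filtered_alns[spid][mkid] = mkdict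
--                 filtered_covered_markers[spid].append(mkid)
--
--     # At least two markers are covered with at least two reads
--     final_covered_markers = {spid:lom for spid, lom in filtered_covered_markers.items() if len(lom) >= min_mcounts}
--
--     final_alns = {spid:_ for spid, _ in filtered_alns.items() if spid in final_covered_markers.keys()}
--
--     return final_alns, final_covered_markers
-- ===== SOURCE B (Python) =====
-- def filter_species_by_alns(alns, min_mreads=2, min_mcounts=2):
--     """Count-first, materialize-second: pass 1 computes only an integer count of
--     qualifying markers per species; pass 2 materializes the output structures for
--     the admitted species alone, and the marker-id lists are derived from them."""
--     counts = {}
--     for spid, aln_dict in alns.items():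
--         for mkdict in aln_dict.values():
--             if mkdict['readcounts'] >= min_mreads:
--                 counts[spid] = counts.get(spid, 0) + 1
--
--     final_alns = {
--         spid: {mkid: mkdict for mkid, mkdict in alns[spid].items()
--                if mkdict['readcounts'] >= min_mreads}
--         for spid, c in counts.items() if c >= min_mcounts
--     }
--     final_covered_markers = {spid: list(mks) for spid, mks in final_alns.items()}
--     return final_alns, final_covered_markers
-- ===== Notes on version B (the rewrite author's own statement) =====
-- stated objective: alternative
-- what changed: A materializes filtered structures for every species (nested defaultdicts) and then filters them by length in two trailing dict comprehensions; B first computes only an integer count of qualifying markers per species in a dict of counters, then materializes the output dicts solely for the species whose count qualifies, deriving the covered-marker lists from the built result instead of accumulating them.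
import Mathlib
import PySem

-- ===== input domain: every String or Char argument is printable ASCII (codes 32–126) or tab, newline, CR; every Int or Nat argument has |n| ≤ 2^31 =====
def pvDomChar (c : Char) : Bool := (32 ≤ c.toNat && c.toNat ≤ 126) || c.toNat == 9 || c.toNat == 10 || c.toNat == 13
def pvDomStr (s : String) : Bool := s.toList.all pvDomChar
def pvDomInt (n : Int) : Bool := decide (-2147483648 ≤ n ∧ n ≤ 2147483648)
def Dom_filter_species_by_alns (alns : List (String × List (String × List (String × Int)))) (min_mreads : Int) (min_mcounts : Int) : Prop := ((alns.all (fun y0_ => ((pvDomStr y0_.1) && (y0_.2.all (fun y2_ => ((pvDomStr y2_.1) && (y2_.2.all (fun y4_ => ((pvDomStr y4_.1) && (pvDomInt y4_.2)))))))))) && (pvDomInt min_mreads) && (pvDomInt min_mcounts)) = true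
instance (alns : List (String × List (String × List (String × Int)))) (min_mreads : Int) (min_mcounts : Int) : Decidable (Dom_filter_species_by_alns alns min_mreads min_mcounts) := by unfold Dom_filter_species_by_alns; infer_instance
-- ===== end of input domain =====

-- B replaces A's materialize-everything-then-filter pipeline by a count-first algorithm: pass 1
-- computes only integer counts of qualifying markers, pass 2 materializes output for the admitted
-- species alone (objective: alternative; same asymptotic cost).

-- ===== PORT A =====
-- one iteration of A's inner marker loop: the two defaultdict updates
def pvAStep (min_mreads : Int) (spid : String)
    (st : PySem.Dict String (PySem.Dict String (List (String × Int))) × PySem.Dict String (List String))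
    (mk : String × List (String × Int)) :
    PySem.Dict String (PySem.Dict String (List (String × Int))) × PySem.Dict String (List String) :=
  if (PySem.Dict.mk mk.2).getD "readcounts" 0 ≥ min_mreads then
    (st.1.insert spid ((st.1.getD spid PySem.Dict.empty).insert mk.1 mk.2),
     st.2.insert spid (st.2.getD spid [] ++ [mk.1]))
  else st
  -- 'mkdict["readcounts"]' is ported as getD … 0; Pre_ guarantees the key is present, so this
  -- agrees with Python (which raises KeyError when the key is absent)

def filter_species_by_alns (alns : List (String × List (String × List (String × Int)))) (min_mreads : Int) (min_mcounts : Int) : (List (String × List (String × List (String × Int)))) × (List (String × List String)) :=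
  let st := alns.foldl (fun st sp => sp.2.foldl (pvAStep min_mreads sp.1) st)
      (PySem.Dict.empty, PySem.Dict.empty)
  let final_cov : PySem.Dict String (List String) :=
      PySem.Dict.mk (st.2.items.filter (fun p => decide ((p.2.length : Int) ≥ min_mcounts)))
  let final_alns := st.1.items.filter (fun p => final_cov.keys.contains p.1)
  (final_alns.map (fun p => (p.1, p.2.items)), final_cov.items)

-- ===== PORT B =====
-- Source B pass 1: one iteration of the counting loop over one species' markers
def pvCntStep (min_mreads : Int) (spid : String) (cnt : PySem.Dict String Int)
    (m : String × List (String × Int)) : PySem.Dict String Int :=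
  if (PySem.Dict.mk m.2).getD "readcounts" 0 ≥ min_mreads then
    cnt.insert spid (cnt.getD spid 0 + 1)
  else cnt

-- Source B's inner dict comprehension (markers of one species with enough reads)
def pvAltKept (min_mreads : Int) (aln_dict : List (String × List (String × Int))) :
    List (String × List (String × Int)) :=
  aln_dict.filter (fun m => decide ((PySem.Dict.mk m.2).getD "readcounts" 0 ≥ min_mreads))

def filter_species_by_alns_alt (alns : List (String × List (String × List (String × Int)))) (min_mreads : Int) (min_mcounts : Int) : (List (String × List (String × List (String × Int)))) × (List (String × List String)) :=
  let counts := alns.foldl (fun cnt sp => sp.2.foldl (pvCntStep min_mreads sp.1) cnt)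
      PySem.Dict.empty
  let final_alns := (counts.items.filter (fun p => decide (p.2 ≥ min_mcounts))).map
      (fun p => (p.1, pvAltKept min_mreads ((PySem.Dict.mk alns).getD p.1 [])))
      -- 'alns[spid]' ported as getD … []; spid is a key of counts, hence of alns, so the
      -- default is never taken
  (final_alns, final_alns.map (fun p => (p.1, p.2.map Prod.fst)))

-- ===== PRECONDITION & SPEC =====
-- Pre_ excludes inputs where some marker dict lacks the "readcounts" key (A raises KeyError there),
-- and requires the keys of each association list to be distinct, since duplicate keys cannot arise
-- from a Python dict argument.
def Pre_filter_species_by_alns (alns : List (String × List (String × List (String × Int)))) (min_mreads : Int) (min_mcounts : Int) : Prop :=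
  (alns.map Prod.fst).Nodup ∧
  ∀ sp ∈ alns, (sp.2.map Prod.fst).Nodup ∧ ∀ m ∈ sp.2, "readcounts" ∈ m.2.map Prod.fst
instance (alns : List (String × List (String × List (String × Int)))) (min_mreads : Int) (min_mcounts : Int) : Decidable (Pre_filter_species_by_alns alns min_mreads min_mcounts) := by unfold Pre_filter_species_by_alns; infer_instance

def pvWitness_filter_species_by_alns : (List (String × List (String × List (String × Int)))) × Int × Int :=
  ([("s1", [("m1", [("readcounts", 3)]), ("m2", [("readcounts", 2)])]), ("s2", [("m1", [("readcounts", 1)])])], 2, 2)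

def Spec_filter_species_by_alns (alns : List (String × List (String × List (String × Int)))) (min_mreads : Int) (min_mcounts : Int) (out : (List (String × List (String × List (String × Int)))) × (List (String × List String))) : Prop := out = filter_species_by_alns_alt alns min_mreads min_mcounts
instance (alns : List (String × List (String × List (String × Int)))) (min_mreads : Int) (min_mcounts : Int) (out : (List (String × List (String × List (String × Int)))) × (List (String × List String))) : Decidable (Spec_filter_species_by_alns alns min_mreads min_mcounts out) := by
  unfold Spec_filter_species_by_alns
  letI h : DecidableEq (String × List (String × List (String × Int))) := inferInstance
  infer_instance

-- ===== CLAIM (what is proved, stated in full; the proofs are below) =====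
def Claim_equal_filter_species_by_alns : Prop := ∀ (alns : List (String × List (String × List (String × Int)))) (min_mreads : Int) (min_mcounts : Int), Dom_filter_species_by_alns alns min_mreads min_mcounts → Pre_filter_species_by_alns alns min_mreads min_mcounts → Spec_filter_species_by_alns alns min_mreads min_mcounts (filter_species_by_alns alns min_mreads min_mcounts)

-- ===== LEMMAS AND PROOFS =====

-- the per-species admission tests used to characterise both programs
def pvP (min_mreads : Int) (sp : String × List (String × List (String × Int))) : Bool :=
  !(pvAltKept min_mreads sp.2).isEmpty

def pvC (min_mreads min_mcounts : Int) (sp : String × List (String × List (String × Int))) : Bool :=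
  decide (pvAltKept min_mreads sp.2 ≠ [] ∧ ((pvAltKept min_mreads sp.2).length : Int) ≥ min_mcounts)

-- what A's accumulation loop produces, species by species
def pvASpec (min_mreads : Int) (alns : List (String × List (String × List (String × Int)))) :
    List (String × PySem.Dict String (List (String × Int))) :=
  (alns.filter (pvP min_mreads)).map (fun sp => (sp.1, PySem.Dict.mk (pvAltKept min_mreads sp.2)))

def pvBSpec (min_mreads : Int) (alns : List (String × List (String × List (String × Int)))) :
    List (String × List String) :=
  (alns.filter (pvP min_mreads)).map (fun sp => (sp.1, (pvAltKept min_mreads sp.2).map Prod.fst))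

-- what B's counting loop produces
def pvCntSpec (min_mreads : Int) (alns : List (String × List (String × List (String × Int)))) :
    List (String × Int) :=
  (alns.filter (pvP min_mreads)).map (fun sp => (sp.1, ((pvAltKept min_mreads sp.2).length : Int)))

-- association-list facts about a dict whose key of interest sits at the end
theorem pv_get?_append_last {ν : Type} (A1 : List (String × ν)) (k : String) (v : ν)
    (h : k ∉ A1.map Prod.fst) :
    (PySem.Dict.mk (A1 ++ [(k, v)])).get? k = some v := by
  induction A1 with
  | nil => simp [PySem.Dict.get?_mk_cons]
  | cons p t ih =>
    simp only [List.map_cons, List.mem_cons, not_or] at h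
    rw [List.cons_append, PySem.Dict.get?_mk_cons, if_neg (by simpa using fun e => h.1 e.symm)]
    exact ih h.2

theorem pv_contains_mk_false {ν : Type} (A0 : List (String × ν)) (k : String)
    (h : k ∉ A0.map Prod.fst) : (PySem.Dict.mk A0).contains k = false := by
  simp only [PySem.Dict.contains]
  rw [List.any_eq_false]
  intro p hp
  simp only [beq_iff_eq]
  exact fun hb => h (hb ▸ List.mem_map_of_mem hp)

theorem pv_contains_append_last {ν : Type} (A1 : List (String × ν)) (k : String) (v : ν) :
    (PySem.Dict.mk (A1 ++ [(k, v)])).contains k = true := by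
  simp [PySem.Dict.contains]

theorem pv_insert_append_last {ν : Type} (A1 : List (String × ν)) (k : String) (v w : ν)
    (h : k ∉ A1.map Prod.fst) :
    (PySem.Dict.mk (A1 ++ [(k, v)])).insert k w = PySem.Dict.mk (A1 ++ [(k, w)]) := by
  simp only [PySem.Dict.insert, pv_contains_append_last, if_true]
  congr 1
  rw [List.map_append]
  congr 1
  · rw [List.map_congr_left (g := id) ?_, List.map_id]
    intro p hp
    have hne : ¬ p.1 = k := fun e => h (e ▸ List.mem_map_of_mem hp)
    simp [hne]
  · simp

theorem pv_insert_fresh {ν : Type} (A0 : List (String × ν)) (k : String) (w : ν)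
    (h : k ∉ A0.map Prod.fst) :
    (PySem.Dict.mk A0).insert k w = PySem.Dict.mk (A0 ++ [(k, w)]) := by
  apply PySem.Dict.ext
  rw [PySem.Dict.items_insert_of_not_contains _ _ (pv_contains_mk_false A0 k h)]

theorem pv_getD_append_last {ν : Type} (A1 : List (String × ν)) (k : String) (v d0 : ν)
    (h : k ∉ A1.map Prod.fst) :
    (PySem.Dict.mk (A1 ++ [(k, v)])).getD k d0 = v := by
  rw [PySem.Dict.getD_eq_get?_getD, pv_get?_append_last _ _ _ h]; rfl

-- A's inner loop, once the species already owns the LAST entry of both accumulators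
theorem pvA_inner_ext (mr : Int) (spid : String)
    (d : List (String × List (String × Int))) :
    ∀ (A1 : List (String × PySem.Dict String (List (String × Int))))
      (B1 : List (String × List String))
      (cur : List (String × List (String × Int))) (ids : List String),
    spid ∉ A1.map Prod.fst → spid ∉ B1.map Prod.fst →
    (∀ m ∈ d, m.1 ∉ cur.map Prod.fst) → (d.map Prod.fst).Nodup →
    d.foldl (pvAStep mr spid)
      (PySem.Dict.mk (A1 ++ [(spid, PySem.Dict.mk cur)]), PySem.Dict.mk (B1 ++ [(spid, ids)]))
    = (PySem.Dict.mk (A1 ++ [(spid, PySem.Dict.mk (cur ++ pvAltKept mr d))]),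
       PySem.Dict.mk (B1 ++ [(spid, ids ++ (pvAltKept mr d).map Prod.fst)])) := by
  induction d with
  | nil => intro A1 B1 cur ids _ _ _ _; simp [pvAltKept]
  | cons m d' ih =>
    intro A1 B1 cur ids hA hB hdisj hnd
    simp only [List.map_cons, List.nodup_cons] at hnd
    by_cases hq : (PySem.Dict.mk m.2).getD "readcounts" 0 ≥ mr
    · rw [List.foldl_cons]
      have hstep : pvAStep mr spid
          (PySem.Dict.mk (A1 ++ [(spid, PySem.Dict.mk cur)]), PySem.Dict.mk (B1 ++ [(spid, ids)])) m
          = (PySem.Dict.mk (A1 ++ [(spid, PySem.Dict.mk (cur ++ [m]))]),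
             PySem.Dict.mk (B1 ++ [(spid, ids ++ [m.1])])) := by
        simp only [pvAStep, if_pos hq]
        have h1 : (PySem.Dict.mk (A1 ++ [(spid, PySem.Dict.mk cur)])).getD spid PySem.Dict.empty
            = PySem.Dict.mk cur := pv_getD_append_last _ _ _ _ hA
        have h2 : (PySem.Dict.mk cur).insert m.1 m.2 = PySem.Dict.mk (cur ++ [m]) := by
          rw [pv_insert_fresh _ _ _ (hdisj m (by simp))]
        have h3 : (PySem.Dict.mk (B1 ++ [(spid, ids)])).getD spid [] = ids :=
          pv_getD_append_last _ _ _ _ hB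
        rw [h1, h2, h3, pv_insert_append_last _ _ _ _ hA, pv_insert_append_last _ _ _ _ hB]
      rw [hstep, ih A1 B1 (cur ++ [m]) (ids ++ [m.1]) hA hB ?_ hnd.2]
      · have hkept : pvAltKept mr (m :: d') = m :: pvAltKept mr d' := by
          simp [pvAltKept, hq]
        rw [hkept]
        simp [List.append_assoc]
      · intro m' hm'
        simp only [List.map_append, List.mem_append, not_or]
        refine ⟨hdisj m' (by simp [hm']), ?_⟩
        intro hcontra
        simp only [List.map_cons, List.mem_cons] at hcontra
        rcases hcontra with e | e
        · exact hnd.1 (e ▸ List.mem_map_of_mem hm')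
        · exact absurd e (by simp)
    · rw [List.foldl_cons]
      have hstep : pvAStep mr spid
          (PySem.Dict.mk (A1 ++ [(spid, PySem.Dict.mk cur)]), PySem.Dict.mk (B1 ++ [(spid, ids)])) m
          = (PySem.Dict.mk (A1 ++ [(spid, PySem.Dict.mk cur)]), PySem.Dict.mk (B1 ++ [(spid, ids)])) := by
        simp only [pvAStep, if_neg hq]
      rw [hstep, ih A1 B1 cur ids hA hB (fun m' hm' => hdisj m' (by simp [hm'])) hnd.2]
      have hkept : pvAltKept mr (m :: d') = pvAltKept mr d' := by
        simp [pvAltKept, hq]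
      rw [hkept]

-- A's inner loop for a species not yet present in either accumulator
theorem pvA_species (mr : Int) (spid : String)
    (d : List (String × List (String × Int)))
    (A0 : List (String × PySem.Dict String (List (String × Int))))
    (B0 : List (String × List String))
    (hA : spid ∉ A0.map Prod.fst) (hB : spid ∉ B0.map Prod.fst)
    (hnd : (d.map Prod.fst).Nodup) :
    d.foldl (pvAStep mr spid) (PySem.Dict.mk A0, PySem.Dict.mk B0)
    = if pvAltKept mr d = [] then (PySem.Dict.mk A0, PySem.Dict.mk B0)
      else (PySem.Dict.mk (A0 ++ [(spid, PySem.Dict.mk (pvAltKept mr d))]),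
            PySem.Dict.mk (B0 ++ [(spid, (pvAltKept mr d).map Prod.fst)])) := by
  induction d with
  | nil => simp [pvAltKept]
  | cons m d' ih =>
    simp only [List.map_cons, List.nodup_cons] at hnd
    by_cases hq : (PySem.Dict.mk m.2).getD "readcounts" 0 ≥ mr
    · have hkept : pvAltKept mr (m :: d') = m :: pvAltKept mr d' := by
        simp [pvAltKept, hq]
      rw [List.foldl_cons]
      have hstep : pvAStep mr spid (PySem.Dict.mk A0, PySem.Dict.mk B0) m
          = (PySem.Dict.mk (A0 ++ [(spid, PySem.Dict.mk [m])]),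
             PySem.Dict.mk (B0 ++ [(spid, [m.1])])) := by
        simp only [pvAStep, if_pos hq]
        have h1 : (PySem.Dict.mk A0).getD spid PySem.Dict.empty = PySem.Dict.empty :=
          PySem.Dict.getD_of_not_contains _ _ (pv_contains_mk_false A0 spid hA)
        have h2 : (PySem.Dict.mk B0).getD spid [] = [] :=
          PySem.Dict.getD_of_not_contains _ _ (pv_contains_mk_false B0 spid hB)
        have h3 : (PySem.Dict.empty : PySem.Dict String (List (String × Int))).insert m.1 m.2
            = PySem.Dict.mk [m] := by
          simpa [PySem.Dict.empty] using
            pv_insert_fresh ([] : List (String × List (String × Int))) m.1 m.2 (by simp)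
        rw [h1, h2, h3, pv_insert_fresh _ _ _ hA, pv_insert_fresh _ _ _ hB]
        simp
      rw [hstep,
        pvA_inner_ext mr spid d' A0 B0 [m] [m.1] hA hB ?_ hnd.2]
      · rw [hkept, if_neg (by simp)]
        simp
      · intro m' hm'
        simp only [List.map_cons, List.map_nil, List.mem_singleton]
        exact fun e => hnd.1 (e ▸ List.mem_map_of_mem hm')
    · have hkept : pvAltKept mr (m :: d') = pvAltKept mr d' := by
        simp [pvAltKept, hq]
      rw [List.foldl_cons]
      have hstep : pvAStep mr spid (PySem.Dict.mk A0, PySem.Dict.mk B0) m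
          = (PySem.Dict.mk A0, PySem.Dict.mk B0) := by
        simp only [pvAStep, if_neg hq]
      rw [hstep, ih hnd.2, hkept]

-- A's whole accumulation loop, given distinct species ids
theorem pvA_outer (mr : Int) (alns : List (String × List (String × List (String × Int)))) :
    ∀ (A0 : List (String × PySem.Dict String (List (String × Int))))
      (B0 : List (String × List String)),
    (alns.map Prod.fst).Nodup →
    (∀ sp ∈ alns, sp.1 ∉ A0.map Prod.fst ∧ sp.1 ∉ B0.map Prod.fst) →
    (∀ sp ∈ alns, (sp.2.map Prod.fst).Nodup) →
    alns.foldl (fun st sp => sp.2.foldl (pvAStep mr sp.1) st) (PySem.Dict.mk A0, PySem.Dict.mk B0)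
    = (PySem.Dict.mk (A0 ++ pvASpec mr alns), PySem.Dict.mk (B0 ++ pvBSpec mr alns)) := by
  induction alns with
  | nil => intro A0 B0 _ _ _; simp [pvASpec, pvBSpec]
  | cons sp rest ih =>
    intro A0 B0 hnd hfresh hmk
    simp only [List.map_cons, List.nodup_cons] at hnd
    rw [List.foldl_cons,
      pvA_species mr sp.1 sp.2 A0 B0 (hfresh sp (by simp)).1 (hfresh sp (by simp)).2
        (hmk sp (by simp))]
    by_cases hk : pvAltKept mr sp.2 = []
    · rw [if_pos hk, ih A0 B0 hnd.2 (fun sp' h' => hfresh sp' (by simp [h'])) (fun sp' h' => hmk sp' (by simp [h']))]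
      have : pvP mr sp = false := by simp [pvP, hk]
      simp [pvASpec, pvBSpec, this]
    · rw [if_neg hk,
        ih (A0 ++ [(sp.1, PySem.Dict.mk (pvAltKept mr sp.2))])
           (B0 ++ [(sp.1, (pvAltKept mr sp.2).map Prod.fst)]) hnd.2 ?_
           (fun sp' h' => hmk sp' (by simp [h']))]
      · have : pvP mr sp = true := by simp [pvP, hk]
        simp [pvASpec, pvBSpec, this, List.append_assoc]
      · intro sp' h'
        have h1 := hfresh sp' (by simp [h'])
        have h2 : sp'.1 ≠ sp.1 := fun e => hnd.1 (e ▸ List.mem_map_of_mem h')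
        constructor <;> simp [h1.1, h1.2, h2]

-- B's counting loop, once the species already owns the LAST entry of the counter
theorem pvCnt_inner_ext (mr : Int) (spid : String)
    (d : List (String × List (String × Int))) :
    ∀ (C0 : List (String × Int)) (c : Int), spid ∉ C0.map Prod.fst →
    d.foldl (pvCntStep mr spid) (PySem.Dict.mk (C0 ++ [(spid, c)]))
      = PySem.Dict.mk (C0 ++ [(spid, c + ((pvAltKept mr d).length : Int))]) := by
  induction d with
  | nil => intro C0 c _; simp [pvAltKept]
  | cons m d' ih =>
    intro C0 c h
    by_cases hq : (PySem.Dict.mk m.2).getD "readcounts" 0 ≥ mr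
    · rw [List.foldl_cons]
      have hstep : pvCntStep mr spid (PySem.Dict.mk (C0 ++ [(spid, c)])) m
          = PySem.Dict.mk (C0 ++ [(spid, c + 1)]) := by
        simp only [pvCntStep, if_pos hq, pv_getD_append_last _ _ _ _ h,
          pv_insert_append_last _ _ _ _ h]
      rw [hstep, ih C0 (c + 1) h]
      have hkept : pvAltKept mr (m :: d') = m :: pvAltKept mr d' := by
        simp [pvAltKept, hq]
      rw [hkept]
      congr 2
      simp
      ring
    · rw [List.foldl_cons]
      have hstep : pvCntStep mr spid (PySem.Dict.mk (C0 ++ [(spid, c)])) m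
          = PySem.Dict.mk (C0 ++ [(spid, c)]) := by
        simp only [pvCntStep, if_neg hq]
      rw [hstep, ih C0 c h]
      have hkept : pvAltKept mr (m :: d') = pvAltKept mr d' := by
        simp [pvAltKept, hq]
      rw [hkept]

-- B's counting loop over one fresh species
theorem pvCnt_species (mr : Int) (spid : String)
    (d : List (String × List (String × Int))) (C0 : List (String × Int))
    (h : spid ∉ C0.map Prod.fst) :
    d.foldl (pvCntStep mr spid) (PySem.Dict.mk C0)
      = if pvAltKept mr d = [] then PySem.Dict.mk C0
        else PySem.Dict.mk (C0 ++ [(spid, ((pvAltKept mr d).length : Int))]) := by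
  induction d with
  | nil => simp [pvAltKept]
  | cons m d' ih =>
    by_cases hq : (PySem.Dict.mk m.2).getD "readcounts" 0 ≥ mr
    · have hkept : pvAltKept mr (m :: d') = m :: pvAltKept mr d' := by
        simp [pvAltKept, hq]
      rw [List.foldl_cons]
      have hstep : pvCntStep mr spid (PySem.Dict.mk C0) m
          = PySem.Dict.mk (C0 ++ [(spid, 1)]) := by
        simp only [pvCntStep, if_pos hq,
          PySem.Dict.getD_of_not_contains _ _ (pv_contains_mk_false C0 spid h),
          pv_insert_fresh _ _ _ h]
        norm_num
      rw [hstep, pvCnt_inner_ext mr spid d' C0 1 h, hkept, if_neg (by simp)]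
      congr 2
      simp
      ring
    · have hkept : pvAltKept mr (m :: d') = pvAltKept mr d' := by
        simp [pvAltKept, hq]
      rw [List.foldl_cons]
      have hstep : pvCntStep mr spid (PySem.Dict.mk C0) m = PySem.Dict.mk C0 := by
        simp only [pvCntStep, if_neg hq]
      rw [hstep, ih, hkept]

-- B's whole counting loop, given distinct species ids
theorem pvCnt_outer (mr : Int) (alns : List (String × List (String × List (String × Int)))) :
    ∀ (C0 : List (String × Int)),
    (alns.map Prod.fst).Nodup →
    (∀ sp ∈ alns, sp.1 ∉ C0.map Prod.fst) →
    alns.foldl (fun cnt sp => sp.2.foldl (pvCntStep mr sp.1) cnt) (PySem.Dict.mk C0)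
      = PySem.Dict.mk (C0 ++ pvCntSpec mr alns) := by
  induction alns with
  | nil => intro C0 _ _; simp [pvCntSpec]
  | cons sp rest ih =>
    intro C0 hnd hfresh
    simp only [List.map_cons, List.nodup_cons] at hnd
    rw [List.foldl_cons, pvCnt_species mr sp.1 sp.2 C0 (hfresh sp (by simp))]
    by_cases hk : pvAltKept mr sp.2 = []
    · rw [if_pos hk, ih C0 hnd.2 (fun sp' h' => hfresh sp' (by simp [h']))]
      have : pvP mr sp = false := by simp [pvP, hk]
      simp [pvCntSpec, this]
    · rw [if_neg hk,
        ih (C0 ++ [(sp.1, ((pvAltKept mr sp.2).length : Int))]) hnd.2 ?_]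
      · have : pvP mr sp = true := by simp [pvP, hk]
        simp [pvCntSpec, this, List.append_assoc]
      · intro sp' h'
        have h1 := hfresh sp' (by simp [h'])
        have h2 : sp'.1 ≠ sp.1 := fun e => hnd.1 (e ▸ List.mem_map_of_mem h')
        simp [h1, h2]

-- first-match lookup in a Nodup association list at a member key
theorem pv_getD_mk_of_mem (alns : List (String × List (String × List (String × Int))))
    (hnd : (alns.map Prod.fst).Nodup)
    (sp : String × List (String × List (String × Int))) (hsp : sp ∈ alns) :
    (PySem.Dict.mk alns).getD sp.1 [] = sp.2 := by
  have hkeys : (PySem.Dict.mk alns).keys.Nodup := by simpa [PySem.Dict.keys_mk] using hnd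
  have hitems : (sp.1, sp.2) ∈ (PySem.Dict.mk alns).items := by simpa using hsp
  exact PySem.Dict.getD_of_mem_items _ hitems hkeys []

-- ===== VERDICT (by name: the statement is the Claim_ definition above) =====
theorem filter_species_by_alns_spec : Claim_equal_filter_species_by_alns := by
  intro alns mr mc _ hpre
  obtain ⟨hnd, hsp⟩ := hpre
  unfold Spec_filter_species_by_alns
  have hAB := pvA_outer mr alns [] [] hnd (by simp) (fun sp h => (hsp sp h).1)
  simp only [List.nil_append] at hAB
  have hCnt := pvCnt_outer mr alns [] hnd (by simp)
  simp only [List.nil_append] at hCnt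
  -- the counter entries that survive the count filter are exactly the pvC species
  have hcnt2 : (pvCntSpec mr alns).filter (fun p => decide (p.2 ≥ mc))
      = (alns.filter (pvC mr mc)).map
          (fun sp => (sp.1, ((pvAltKept mr sp.2).length : Int))) := by
    unfold pvCntSpec
    rw [List.filter_map, List.filter_filter]
    refine congrArg _ (List.filter_congr fun sp _ => ?_)
    by_cases h1 : pvAltKept mr sp.2 = [] <;>
      by_cases h2 : ((pvAltKept mr sp.2).length : Int) ≥ mc <;>
        simp [pvC, pvP, Function.comp, h1, h2]
  -- B's final_alns, after replacing the lookup by the species' own marker list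
  have hBalns : ((alns.filter (pvC mr mc)).map
        (fun sp => (sp.1, ((pvAltKept mr sp.2).length : Int)))).map
        (fun p => (p.1, pvAltKept mr ((PySem.Dict.mk alns).getD p.1 [])))
      = (alns.filter (pvC mr mc)).map (fun sp => (sp.1, pvAltKept mr sp.2)) := by
    rw [List.map_map]
    refine List.map_congr_left fun sp hmem => ?_
    have hsp' : sp ∈ alns := List.mem_of_mem_filter hmem
    simp [Function.comp, pv_getD_mk_of_mem alns hnd sp hsp']
  -- A's final_cov
  have hcov : (pvBSpec mr alns).filter (fun p => decide ((p.2.length : Int) ≥ mc))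
      = (alns.filter (pvC mr mc)).map (fun sp => (sp.1, (pvAltKept mr sp.2).map Prod.fst)) := by
    unfold pvBSpec
    rw [List.filter_map, List.filter_filter]
    refine congrArg _ (List.filter_congr fun sp _ => ?_)
    by_cases h1 : pvAltKept mr sp.2 = [] <;>
      by_cases h2 : ((pvAltKept mr sp.2).length : Int) ≥ mc <;>
        simp [pvC, pvP, Function.comp, h1, h2]
  have hkeys : List.map (fun (x : String × List String) => x.1)
        ((alns.filter (pvC mr mc)).map (fun sp => (sp.1, (pvAltKept mr sp.2).map Prod.fst)))
      = (alns.filter (pvC mr mc)).map Prod.fst := by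
    rw [List.map_map]; rfl
  have halns : (pvASpec mr alns).filter
        (fun p => ((alns.filter (pvC mr mc)).map Prod.fst).contains p.1)
      = (alns.filter (pvC mr mc)).map (fun sp => (sp.1, PySem.Dict.mk (pvAltKept mr sp.2))) := by
    unfold pvASpec
    rw [List.filter_map, List.filter_filter]
    refine congrArg _ (List.filter_congr fun sp hmem => ?_)
    by_cases hc : pvC mr mc sp = true
    · have hmemk : sp.1 ∈ (alns.filter (pvC mr mc)).map Prod.fst :=
        List.mem_map_of_mem (List.mem_filter.mpr ⟨hmem, hc⟩)
      have hP : pvP mr sp = true := by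
        have := (of_decide_eq_true hc).1
        simp [pvP, this]
      simp [Function.comp, hmemk, hP, hc]
    · have hmemk : sp.1 ∉ (alns.filter (pvC mr mc)).map Prod.fst := by
        intro h
        obtain ⟨sp', hsp', he⟩ := List.mem_map.mp h
        have h1 := List.mem_of_mem_filter hsp'
        have h2 := List.of_mem_filter hsp'
        have : sp' = sp := List.inj_on_of_nodup_map hnd h1 hmem he
        exact hc (this ▸ h2)
      simp [Function.comp, hmemk, Bool.eq_false_iff.mpr hc]
  simp only [filter_species_by_alns, filter_species_by_alns_alt, PySem.Dict.empty]
  rw [hAB, hCnt]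
  simp only [PySem.Dict.keys]
  rw [hcov, hkeys, halns]
  rw [hcnt2, hBalns]
  rw [List.map_map, List.map_map]
  rfl
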